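-- pv_equiv track=rewrite | github.com/bent1e/Monet | Easyr1-temp/verl/workers/rollout/vllm_rollout_spmd.py | find_delim_positions
-- ===== SOURCE A (Python) =====
-- from typing import Any, Dict, List, Optional, Union, Tuple, Sequence
--
-- def find_delim_positions(
--     response_ids: List[int],
--     delim_ids_list: List[str]
-- ) -> List[int]:
--     positions: List[int] = []
--     i = 0
--     n = len(response_ids)
--
--     while i < n:
--         matched = False
--         for delim_ids in delim_ids_list:
--             m = len(delim_ids)
--             if m == 0 or i + m > n:
--                 continue
--             if response_ids[i : i + m] == delim_ids:
--                 positions.append(i)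
--                 i += m
--                 matched = True
--                 break
--         if not matched:
--             i += 1
--     delim_poss = positions.copy()  # copy the positions to avoid modifying the original list
--     positions = positions + [n-1]
--     if positions[0] == 0 and len(positions) > 1:
--         positions = positions[1:]
--     return delim_poss, positions
-- ===== SOURCE B (Python) =====
-- def find_delim_positions(response_ids, delim_ids_list):
--     # Index delimiters by their first token (empty delimiters can never match and are dropped).
--     index = {}
--     for d in delim_ids_list:
--         if d:
--             index[d[0]] = index.get(d[0], []) + [d]
--     n = len(response_ids)
--     matches = []
--     pos = 0
--     rest = response_ids
--     while rest:
--         d = next((c for c in index.get(rest[0], []) if rest[:len(c)] == c), None)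
--         if d is None:
--             rest = rest[1:]
--             pos += 1
--         else:
--             matches.append(pos)
--             rest = rest[len(d):]
--             pos += len(d)
--     positions = matches + [n - 1]
--     if positions[0] == 0 and len(positions) > 1:
--         positions = positions[1:]
--     return matches, positions
-- ===== Notes on version B (the rewrite author's own statement) =====
-- stated objective: alternative
-- what changed: B first builds a dict indexing the non-empty delimiters by their first token, then scans the response as a shrinking suffix (prefix comparison instead of index slicing), testing only the delimiters whose first token matches the current one, instead of A's index-based scan that tries every delimiter at every position.
import Mathlib
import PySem

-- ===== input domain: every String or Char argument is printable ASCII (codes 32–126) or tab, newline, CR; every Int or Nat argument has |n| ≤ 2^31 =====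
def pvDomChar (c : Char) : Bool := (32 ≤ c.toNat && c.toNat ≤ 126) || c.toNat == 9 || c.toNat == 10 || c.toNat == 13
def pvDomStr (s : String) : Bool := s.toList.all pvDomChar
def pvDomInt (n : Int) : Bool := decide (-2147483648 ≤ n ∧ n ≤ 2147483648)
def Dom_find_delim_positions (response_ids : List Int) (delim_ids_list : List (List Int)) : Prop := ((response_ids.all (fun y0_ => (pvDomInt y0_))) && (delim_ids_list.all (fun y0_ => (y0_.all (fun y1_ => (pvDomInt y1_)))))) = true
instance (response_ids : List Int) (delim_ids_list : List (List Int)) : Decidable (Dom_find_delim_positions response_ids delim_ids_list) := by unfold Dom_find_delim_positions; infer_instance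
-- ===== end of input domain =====

-- B replaces A's inner scan over the whole delimiter list by a dict index keyed on the
-- delimiter's first token and a suffix-based scan (objective: alternative decomposition).

-- ===== PORT A =====
-- inner 'for delim_ids in delim_ids_list' loop: first delimiter that matches at position i
def pvInnerA (resp : List Int) (n i : Int) : List (List Int) → Option (List Int)
  | [] => none
  | d :: ds =>
    let m : Int := d.length
    if m = 0 ∨ i + m > n then pvInnerA resp n i ds
    else if PySem.List.slice resp (some i) (some (i + m)) = d then some d
    else pvInnerA resp n i ds

-- the 'while i < n' loop; fuel = n - i (a matched delimiter has length ≥ 1, so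
-- the new fuel n - (i+m) is f - (m-1) when the old one is f+1)
def pvLoopA (resp : List Int) (dl : List (List Int)) (n : Int) (fuel : Nat) (i : Int) : List Int :=
  match fuel with
  | 0 => []
  | f + 1 =>
    match pvInnerA resp n i dl with
    | some d => i :: pvLoopA resp dl n (f - (d.length - 1)) (i + (d.length : Int))
    | none => pvLoopA resp dl n f (i + 1)
termination_by fuel
decreasing_by all_goals omega

def find_delim_positions (response_ids : List Int) (delim_ids_list : List (List Int)) : List Int × List Int :=
  let n : Int := response_ids.length
  let positions := pvLoopA response_ids delim_ids_list n response_ids.length 0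
  let delim_poss := positions
  let positions1 := positions ++ [n - 1]
  -- positions1 is never empty, so positions[0] never raises
  let positions2 := if positions1.head? = some 0 ∧ 1 < positions1.length then positions1.drop 1 else positions1
  (delim_poss, positions2)

-- ===== PORT B =====
-- index: first token of each non-empty delimiter ↦ delimiters starting with it, in order
def pvCandIndex (dl : List (List Int)) : PySem.Dict Int (List (List Int)) :=
  (dl.filterMap (fun d => d.head?.map (fun h => (h, d)))).foldl
    (fun dct p => dct.modify p.1 [] (· ++ [p.2])) PySem.Dict.empty

-- the 'while rest' loop; the index holds only non-empty delimiters, so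
-- rest[len(d):] is rs.drop (d.length - 1)
def pvLoopB (index : PySem.Dict Int (List (List Int))) (rest : List Int) (pos : Int) : List Int :=
  match rest with
  | [] => []
  | t :: rs =>
    match (index.getD t []).find? (fun d => (t :: rs).take d.length == d) with
    | some d => pos :: pvLoopB index (rs.drop (d.length - 1)) (pos + (d.length : Int))
    | none => pvLoopB index rs (pos + 1)
termination_by rest.length
decreasing_by all_goals simp [List.length_drop]

def find_delim_positions_alt (response_ids : List Int) (delim_ids_list : List (List Int)) : List Int × List Int :=
  let index := pvCandIndex delim_ids_list
  let n : Int := response_ids.length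
  let matched := pvLoopB index response_ids 0
  let positions1 := matched ++ [n - 1]
  let positions2 := if positions1.head? = some 0 ∧ 1 < positions1.length then positions1.drop 1 else positions1
  (matched, positions2)

-- ===== PRECONDITION & SPEC =====
def Spec_find_delim_positions (response_ids : List Int) (delim_ids_list : List (List Int)) (out : List Int × List Int) : Prop := out = find_delim_positions_alt response_ids delim_ids_list
instance (response_ids : List Int) (delim_ids_list : List (List Int)) (out : List Int × List Int) : Decidable (Spec_find_delim_positions response_ids delim_ids_list out) := by unfold Spec_find_delim_positions; infer_instance

-- ===== CLAIM (what is proved, stated in full; the proofs are below) =====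
def Claim_equal_find_delim_positions : Prop := ∀ (response_ids : List Int) (delim_ids_list : List (List Int)), Dom_find_delim_positions response_ids delim_ids_list → Spec_find_delim_positions response_ids delim_ids_list (find_delim_positions response_ids delim_ids_list)

-- ===== LEMMAS AND PROOFS =====

-- B's index, looked up at t, is exactly the delimiters whose first token is t, in order
lemma pvCandIndex_getD (dl : List (List Int)) (t : Int) :
    (pvCandIndex dl).getD t [] = dl.filter (fun d => d.head? == some t) := by
  unfold pvCandIndex
  rw [PySem.Dict.getD_foldl_modify_append]
  simp only [PySem.Dict.getD_empty, List.nil_append]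
  induction dl with
  | nil => rfl
  | cons d ds ih =>
    cases d with
    | nil => simpa using ih
    | cons x xs =>
      by_cases hx : x = t
      · subst hx; simp [List.filter_cons, ih]
      · simp [List.filter_cons, hx, ih]

-- A's inner scan = find? over B's candidate list, at position k with rest = resp.drop k
lemma inner_eq_find (resp : List Int) (dl : List (List Int)) (k : Nat) (t : Int) (rs : List Int)
    (hdrop : resp.drop k = t :: rs) :
    pvInnerA resp (resp.length : Int) (k : Int) dl
      = (dl.filter (fun d => d.head? == some t)).find? (fun d => (t :: rs).take d.length == d) := by
  have hk : k < resp.length := by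
    by_contra h
    rw [List.drop_eq_nil_of_le (by omega)] at hdrop
    exact absurd hdrop (by simp)
  induction dl with
  | nil => rfl
  | cons d ds ih =>
    unfold pvInnerA
    have hmatch : ((d.length : Int) ≠ 0 ∧ ¬ ((k : Int) + (d.length : Int) > (resp.length : Int))
          ∧ PySem.List.slice resp (some (k : Int)) (some ((k : Int) + (d.length : Int))) = d)
        ↔ ((t :: rs).take d.length = d ∧ d.head? = some t) := by
      rw [PySem.List.slice_natCast_add, hdrop]
      constructor
      · rintro ⟨hm, hb, hs⟩
        refine ⟨hs, ?_⟩
        rw [← hs]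
        cases d with
        | nil => simp at hm
        | cons x xs => simp
      · rintro ⟨hs, hh⟩
        have hlen : d.length ≤ (t :: rs).length := by
          have := congrArg List.length hs
          rw [List.length_take] at this
          omega
        have hrest : (t :: rs).length = resp.length - k := by
          have := congrArg List.length hdrop
          simpa [List.length_drop] using this.symm
        refine ⟨?_, by omega, hs⟩
        cases d with
        | nil => simp at hh
        | cons x xs => simp only [List.length_cons]; push_cast; omega
    by_cases hh : d.head? = some t
    · -- d is kept by the filter
      simp only [List.filter_cons, hh, beq_self_eq_true, if_pos, List.find?_cons]
      by_cases hs : (t :: rs).take d.length = d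
      · have := hmatch.mpr ⟨hs, hh⟩
        rw [if_neg (by push_neg; exact ⟨this.1, by omega⟩), if_pos this.2.2]
        simp [hs]
      · have h1 : ¬ ((d.length : Int) ≠ 0 ∧ ¬ ((k : Int) + (d.length : Int) > (resp.length : Int))
            ∧ PySem.List.slice resp (some (k : Int)) (some ((k : Int) + (d.length : Int))) = d) := by
          intro h; exact hs (hmatch.mp h).1
        have hbeq : ((t :: rs).take d.length == d) = false := by simpa using hs
        rw [hbeq]
        by_cases hz : (d.length : Int) = 0 ∨ (k : Int) + (d.length : Int) > (resp.length : Int)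
        · rw [if_pos hz]; exact ih
        · push_neg at hz
          rw [if_neg (by push_neg; exact hz)]
          rw [if_neg (by intro hsl; exact h1 ⟨hz.1, by omega, hsl⟩)]
          exact ih
    · -- d is dropped by the filter; A cannot match it either
      have hfilt : (d.head? == some t) = false := by simpa using hh
      simp only [List.filter_cons, hfilt, Bool.false_eq_true, if_false]
      have h1 : ¬ ((d.length : Int) ≠ 0 ∧ ¬ ((k : Int) + (d.length : Int) > (resp.length : Int))
          ∧ PySem.List.slice resp (some (k : Int)) (some ((k : Int) + (d.length : Int))) = d) := by
        intro h; exact hh (hmatch.mp h).2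
      by_cases hz : (d.length : Int) = 0 ∨ (k : Int) + (d.length : Int) > (resp.length : Int)
      · rw [if_pos hz]; exact ih
      · push_neg at hz
        rw [if_neg (by push_neg; exact hz)]
        rw [if_neg (by intro hsl; exact h1 ⟨hz.1, by omega, hsl⟩)]
        exact ih

-- the two scans agree, position by position
lemma loop_eq (resp : List Int) (dl : List (List Int)) :
    ∀ fuel k : Nat, fuel = resp.length - k →
      pvLoopA resp dl (resp.length : Int) fuel (k : Int)
        = pvLoopB (pvCandIndex dl) (resp.drop k) (k : Int) := by
  intro fuel
  induction fuel using Nat.strong_induction_on with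
  | _ fuel ih =>
    intro k hfuel
    cases fuel with
    | zero =>
      have : resp.drop k = [] := List.drop_eq_nil_of_le (by omega)
      rw [this]
      simp [pvLoopA, pvLoopB]
    | succ f =>
      have hk : k < resp.length := by omega
      obtain ⟨t, rs, hdrop⟩ : ∃ t rs, resp.drop k = t :: rs := by
        cases h : resp.drop k with
        | nil => exact absurd (congrArg List.length h) (by simp [List.length_drop]; omega)
        | cons a b => exact ⟨a, b, rfl⟩
      rw [hdrop]
      unfold pvLoopA pvLoopB
      rw [inner_eq_find resp dl k t rs hdrop, pvCandIndex_getD]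
      cases hfind : (dl.filter (fun d => d.head? == some t)).find? (fun d => (t :: rs).take d.length == d) with
      | none =>
        simp only []
        have := ih f (by omega) (k + 1) (by omega)
        have hdrop1 : resp.drop (k + 1) = rs := by
          rw [← List.drop_drop, hdrop]; rfl
        rw [hdrop1] at this
        rw [show ((k : Int) + 1) = ((k + 1 : Nat) : Int) by push_cast; ring]
        exact this
      | some d =>
        have hmem := List.find?_some hfind
        have hd := List.mem_filter.mp (List.mem_of_find?_eq_some hfind) |>.2
        have hne : d ≠ [] := by cases d <;> simp_all
        have hm1 : 1 ≤ d.length := by cases d <;> simp_all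
        have htake : (t :: rs).take d.length = d := by simpa using hmem
        have hlen : d.length ≤ (t :: rs).length := by
          have := congrArg List.length htake
          rw [List.length_take] at this
          omega
        have hrest : (t :: rs).length = resp.length - k := by
          have := congrArg List.length hdrop
          simpa [List.length_drop] using this.symm
        simp only []
        have hdropm : resp.drop (k + d.length) = rs.drop (d.length - 1) := by
          obtain ⟨p, hp⟩ : ∃ p, d.length = p + 1 := ⟨d.length - 1, by omega⟩
          rw [hp]
          have h2 : rs.drop (p + 1 - 1) = (t :: rs).drop (p + 1) := by simp
          rw [h2, ← hdrop, List.drop_drop]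
        have := ih (f - (d.length - 1)) (by omega) (k + d.length) (by simp at hrest ⊢; omega)
        rw [hdropm] at this
        rw [show ((k : Int) + (d.length : Int)) = ((k + d.length : Nat) : Int) by push_cast; ring]
        rw [this]

-- ===== VERDICT (by name: the statement is the Claim_ definition above) =====
theorem find_delim_positions_spec : Claim_equal_find_delim_positions := by
  intro resp dl _
  have h := loop_eq resp dl resp.length 0 (by omega)
  simp only [List.drop_zero, Nat.cast_zero] at h
  simp only [Spec_find_delim_positions, find_delim_positions, find_delim_positions_alt, h]
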